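/- GENERATED by c/gen_decode.py: decode facts of the image, one per distinct instruction byte string. -/
import UserX.DecodeImage

#decode_all Vorbis.Dec
  "0f2fd0"  -- comiss xmm2,xmm0
  "0f848f000000"  -- je 116224
  "0f8549ffffff"  -- jne 113b15
  "0f8d060c0000"  -- jge 10faed
  "0f9cc1"  -- setl cl
  "0fb76d00"  -- movzx ebp,WORD PTR [rbp+0x0]
  "3b8424c00b0000"  -- cmp eax,DWORD PTR [rsp+0xbc0]
  "410fb67500"  -- movzx esi,BYTE PTR [r13+0x0]
  "41807e1901"  -- cmp BYTE PTR [r14+0x19],0x1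
  "418985e4060000"  -- mov DWORD PTR [r13+0x6e4],eax
  "418bae40080000"  -- mov ebp,DWORD PTR [r14+0x840]
  "41d3e1"  -- shl r9d,cl
  "440fb6e8"  -- movzx r13d,al
  "443bb3d0050000"  -- cmp r14d,DWORD PTR [rbx+0x5d0]
  "44898548ffffff"  -- mov DWORD PTR [rbp-0xb8],r8d
  "448b63f4"  -- mov r12d,DWORD PTR [rbx-0xc]
  "448bbc2480000000"  -- mov r15d,DWORD PTR [rsp+0x80]
  "4585f6"  -- test r14d,r14d
  "458b7500"  -- mov r14d,DWORD PTR [r13+0x0]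
  "4803aba8000000"  -- add rbp,QWORD PTR [rbx+0xa8]
  "4863d3"  -- movsxd rdx,ebx
  "4883c438"  -- add rsp,0x38
  "4889542430"  -- mov QWORD PTR [rsp+0x30],rdx
  "488b0c2518f01f00"  -- mov rcx,QWORD PTR ds:0x1ff018
  "488b83b0050000"  -- mov rax,QWORD PTR [rbx+0x5b0]
  "488d4701"  -- lea rax,[rdi+0x1]
  "488d7bf0"  -- lea rdi,[rbx-0x10]
  "488dbae8060000"  -- lea rdi,[rdx+0x6e8]
  "488dbceb78050000"  -- lea rdi,[rbx+rbp*8+0x578]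
  "48c1ea03"  -- shr rdx,0x3
  "49035c2420"  -- add rbx,QWORD PTR [r12+0x20]
  "4983c610"  -- add r14,0x10
  "498d2c6c"  -- lea rbp,[r12+rbp*2]
  "498d7f08"  -- lea rdi,[r15+0x8]
  "49d1ed"  -- shr r13,1
  "4b8d3cae"  -- lea rdi,[r14+r13*4]
  "4c894c2408"  -- mov QWORD PTR [rsp+0x8],r9
  "4c8b642420"  -- mov r12,QWORD PTR [rsp+0x20]
  "4c8d34c8"  -- lea r14,[rax+rcx*8]
  "4d63f6"  -- movsxd r14,r14d
  "4e897cf308"  -- mov QWORD PTR [rbx+r14*8+0x8],r15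
  "660f6edd"  -- movd xmm3,ebp
  "6641895c2402"  -- mov WORD PTR [r12+0x2],bx
  "72e9"  -- jb 100d68
  "7460"  -- je 10d28f
  "7575"  -- jne 11555e
  "7c8f"  -- jl 10c096
  "7ed4"  -- jle 113e51
  "81e200ff00ff"  -- and edx,0xff00ff00
  "83e10f"  -- and ecx,0xf
  "89442448"  -- mov DWORD PTR [rsp+0x48],eax
  "899524ffffff"  -- mov DWORD PTR [rbp-0xdc],edx
  "8b44242c"  -- mov eax,DWORD PTR [rsp+0x2c]
  "8b7d00"  -- mov edi,DWORD PTR [rbp+0x0]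
  "8d41ff"  -- lea eax,[rcx-0x1]
  "be0a000000"  -- mov esi,0xa
  "c6870000c000fa"  -- mov BYTE PTR [rdi+0xc00000],0xfa
  "c783dc06000001000000"  -- mov DWORD PTR [rbx+0x6dc],0x1
  "e8050bffff"  -- call 100300
  "e80eb5feff"  -- call 100640
  "e8189bffff"  -- call 100640
  "e82239ffff"  -- call 100640
  "e82bc7feff"  -- call 100720
  "e834f3feff"  -- call 1003c0
  "e83fb6feff"  -- call 100300
  "e84985ffff"  -- call 104d40
  "e855b1feff"  -- call 100300
  "e86286ffff"  -- call 100720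
  "e86dfcffff"  -- call 108720
  "e8798effff"  -- call 10cbc0
  "e88410ffff"  -- call 100800
  "e88f0fffff"  -- call 100800
  "e898bffeff"  -- call 100640
  "e8a29fffff"  -- call 10d1c0
  "e8ae1bffff"  -- call 100640
  "e8b6cbfeff"  -- call 100640
  "e8c19effff"  -- call 10d1c0
  "e8cab3feff"  -- call 100640
  "e8d59bffff"  -- call 100640
  "e8dfeefeff"  -- call 100640
  "e8e8a5feff"  -- call 100300
  "e8f0ecfeff"  -- call 100720
  "e8fc50ffff"  -- call 100300
  "e92bfdffff"  -- jmp 10dc9e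
  "e973fdffff"  -- jmp 113b22
  "e9cbd3ffff"  -- jmp 113b22
  "eb27"  -- jmp 119bb9
  "ebb6"  -- jmp 1131b0
  "f20f1015e4e10100"  -- movsd xmm2,QWORD PTR [rip+0x1e1e4]
  "f20f59c0"  -- mulsd xmm0,xmm0
  "f30f1013"  -- movss xmm2,DWORD PTR [rbx]
  "f30f1063f8"  -- movss xmm4,DWORD PTR [rbx-0x8]
  "f30f1143d4"  -- movss DWORD PTR [rbx-0x2c],xmm0
  "f30f1164240c"  -- movss DWORD PTR [rsp+0xc],xmm4
  "f30f5844240c"  -- addss xmm0,DWORD PTR [rsp+0xc]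
  "f30f595560"  -- mulss xmm2,DWORD PTR [rbp+0x60]
  "f30f5cd6"  -- subss xmm2,xmm6
  "f3410f114424e8"  -- movss DWORD PTR [r12-0x18],xmm0
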